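-- pv_equiv track=rewrite | github.com/Gaguine/Homework1 | Homework 3/Task1.py | chapters_chapters_dict
-- ===== SOURCE A (Python) =====
-- from typing import List
--
-- def chapters_chapters_dict(data:list)->List[List[str]]:
--     """The following function creates a list of lists, where the objects in the array are the separated chapters of the txt file war_peace."""
--     chapter = []
--     chapters_list = []
--     for word in data:
--         if "new chapter" not in word:
--             chapter.append(word)
--         else:
--             chapters_list.append(chapter)
--             chapter=[]
--     return chapters_list
-- ===== SOURCE B (Python) =====
-- def chapters_chapters_dict(data):
--     """Recursive decomposition: find the first marker word, the chapter is the
--     prefix before it, then recurse on the rest; words after the last marker are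
--     dropped because the recursion bottoms out with no marker found."""
--     for i, word in enumerate(data):
--         if "new chapter" in word:
--             return [data[:i]] + chapters_chapters_dict(data[i + 1:])
--     return []
-- ===== Notes on version B (the rewrite author's own statement) =====
-- stated objective: alternative
-- what changed: Replaces A's single accumulator loop carrying (current chapter, chapters list) state with a stateless recursive decomposition: locate the first marker, take the prefix as a chapter, recurse on the suffix after it.
import Mathlib
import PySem

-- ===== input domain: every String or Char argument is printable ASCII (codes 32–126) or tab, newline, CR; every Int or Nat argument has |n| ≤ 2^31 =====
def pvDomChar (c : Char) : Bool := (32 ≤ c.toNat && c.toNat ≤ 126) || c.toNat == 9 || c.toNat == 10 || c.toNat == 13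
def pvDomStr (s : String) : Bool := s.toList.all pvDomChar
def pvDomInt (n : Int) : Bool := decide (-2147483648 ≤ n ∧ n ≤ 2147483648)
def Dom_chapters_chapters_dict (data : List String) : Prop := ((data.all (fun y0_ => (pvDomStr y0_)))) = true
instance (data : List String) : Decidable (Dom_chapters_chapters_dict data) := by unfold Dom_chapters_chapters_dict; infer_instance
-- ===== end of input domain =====

-- B replaces A's accumulator loop with a stateless recursive decomposition (first marker, prefix chapter, recurse on the rest); objective: alternative, same cost.


-- ===== PORT A =====
-- A: one pass with accumulator state (current chapter, chapters_list).
def chaptersStepA (st : List String × List (List String)) (word : String) : List String × List (List String) :=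
  if !(PySem.Str.isIn "new chapter" word) then (st.1 ++ [word], st.2)
  else ([], st.2 ++ [st.1])

def chapters_chapters_dict (data : List String) : List (List String) :=
  (data.foldl chaptersStepA ([], [])).2

-- ===== PORT B =====
-- B: index of the first marker word (transcription of Source B's enumerate search).
def firstMarkerIdx : List String → Option Nat
  | [] => none
  | w :: ws => if PySem.Str.isIn "new chapter" w then some 0 else (firstMarkerIdx ws).map (· + 1)

theorem firstMarkerIdx_lt : ∀ (ws : List String) (i : Nat), firstMarkerIdx ws = some i → i < ws.length := by
  intro ws
  induction ws with
  | nil => intro i h; simp [firstMarkerIdx] at h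
  | cons w t ih =>
    intro i h
    simp only [firstMarkerIdx] at h
    split at h
    · simp_all; omega
    · cases ht : firstMarkerIdx t with
      | none => simp [ht] at h
      | some j =>
        simp [ht] at h
        have := ih j ht
        simp only [List.length_cons]
        omega

-- data[:i] / data[i+1:] are List.take / List.drop: exact for these nonnegative in-range indices.
def chapters_chapters_dict_alt (data : List String) : List (List String) :=
  match h : firstMarkerIdx data with
  | some i => data.take i :: chapters_chapters_dict_alt (data.drop (i + 1))
  | none => []
termination_by data.length
decreasing_by
  have := firstMarkerIdx_lt data i h
  simp only [List.length_drop]; omega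

-- ===== PRECONDITION & SPEC =====
def Spec_chapters_chapters_dict (data : List String) (out : List (List String)) : Prop := out = chapters_chapters_dict_alt data
instance (data : List String) (out : List (List String)) : Decidable (Spec_chapters_chapters_dict data out) := by unfold Spec_chapters_chapters_dict; infer_instance

-- ===== CLAIM (what is proved, stated in full; the proofs are below) =====
def Claim_equal_chapters_chapters_dict : Prop := ∀ (data : List String), Dom_chapters_chapters_dict data → Spec_chapters_chapters_dict data (chapters_chapters_dict data)

-- ===== LEMMAS AND PROOFS =====
theorem alt_eq (data : List String) :
    chapters_chapters_dict_alt data = match firstMarkerIdx data with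
      | some i => data.take i :: chapters_chapters_dict_alt (data.drop (i + 1))
      | none => [] := by
  rw [chapters_chapters_dict_alt]
  cases hm : firstMarkerIdx data <;> simp

-- intermediate form of A's loop: result appended after the accumulator
def goA (ch : List String) : List String → List (List String)
  | [] => []
  | w :: ws => if PySem.Str.isIn "new chapter" w then ch :: goA [] ws else goA (ch ++ [w]) ws

theorem foldA_eq_goA : ∀ (data : List String) (ch : List String) (acc : List (List String)),
    (data.foldl chaptersStepA (ch, acc)).2 = acc ++ goA ch data := by
  intro data
  induction data with
  | nil => intro ch acc; simp [goA]
  | cons w ws ih =>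
    intro ch acc
    by_cases h : PySem.Str.isIn "new chapter" w <;>
      simp [List.foldl, chaptersStepA, goA, ih] <;> simp at h <;> simp [h]

theorem goA_eq_alt : ∀ (data : List String) (ch : List String),
    goA ch data = match firstMarkerIdx data with
      | some i => (ch ++ data.take i) :: chapters_chapters_dict_alt (data.drop (i + 1))
      | none => [] := by
  intro data
  induction data with
  | nil => intro ch; simp [goA, firstMarkerIdx]
  | cons w ws ih =>
    intro ch
    by_cases h : PySem.Str.isIn "new chapter" w
    · simp only [goA, firstMarkerIdx, h, if_true]
      rw [alt_eq, ih []]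
      cases hm : firstMarkerIdx ws <;> simp [hm]
    · simp only [goA, firstMarkerIdx, h]
      rw [ih (ch ++ [w])]
      cases hm : firstMarkerIdx ws with
      | none => simp
      | some j => simp [List.take_succ_cons, List.drop_succ_cons]

-- ===== VERDICT (by name: the statement is the Claim_ definition above) =====
theorem chapters_chapters_dict_spec : Claim_equal_chapters_chapters_dict := by
  intro data _
  show chapters_chapters_dict data = chapters_chapters_dict_alt data
  rw [chapters_chapters_dict, foldA_eq_goA, goA_eq_alt, alt_eq]
  cases hm : firstMarkerIdx data <;> simp
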